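-- pv_equiv track=rewrite | github.com/wah644/eyetalk | src/eyetrax/app/train_swipe.py | _get_hovered_row
-- ===== SOURCE A (Python) =====
-- KEYBOARD_KEYS = ["ABCD", "EFGH", "IJKL", "MNOP", "QRSTU", "VWXYZ"]  # no SPACE in swipe mode
--
-- KEY_WIDTH     = 300
--
-- KEY_GAP       = 10
--
-- def _key_bounds(row: int, screen_w: int, screen_h: int) -> tuple[int, int, int, int]:
--     n       = len(KEYBOARD_KEYS)
--     avail_h = screen_h - (n - 1) * KEY_GAP
--     key_h   = avail_h // n
--     y1 = row * (key_h + KEY_GAP)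
--     y2 = y1 + key_h
--     x1 = (screen_w - KEY_WIDTH) // 2
--     x2 = x1 + KEY_WIDTH
--     return x1, y1, x2, y2
--
-- def _get_hovered_row(y_pred: int | None, screen_w: int, screen_h: int) -> int | None:
--     """Return the key row index the gaze is currently on, or None."""
--     if y_pred is None:
--         return None
--     for ki in range(len(KEYBOARD_KEYS)):
--         _, y1, _, y2 = _key_bounds(ki, screen_w, screen_h)
--         if y1 <= y_pred <= y2:
--             return ki
--     return None
-- ===== SOURCE B (Python) =====
-- KEYBOARD_KEYS = ["ABCD", "EFGH", "IJKL", "MNOP", "QRSTU", "VWXYZ"]  # no SPACE in swipe mode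
-- KEY_WIDTH     = 300
-- KEY_GAP       = 10
--
-- def _get_hovered_row(y_pred, screen_w, screen_h):
--     """Closed-form row lookup: no scan over the rows."""
--     if y_pred is None:
--         return None
--     n = len(KEYBOARD_KEYS)
--     key_h = (screen_h - (n - 1) * KEY_GAP) // n
--     if key_h < 0:
--         # every row's band is empty (y2 < y1), so no row can contain y_pred
--         return None
--     period = key_h + KEY_GAP
--     row = y_pred // period
--     if 0 <= row < n and y_pred - row * period <= key_h:
--         return row
--     return None
-- ===== Notes on version B (the rewrite author's own statement) =====
-- stated objective: simpler
-- what changed: Replaces the 6-iteration scan over key rows (each recomputing _key_bounds) with a single closed-form index computation: row = y // (key_h + KEY_GAP) plus a range and in-band check, with key_h < 0 handled directly as None.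
import Mathlib
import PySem

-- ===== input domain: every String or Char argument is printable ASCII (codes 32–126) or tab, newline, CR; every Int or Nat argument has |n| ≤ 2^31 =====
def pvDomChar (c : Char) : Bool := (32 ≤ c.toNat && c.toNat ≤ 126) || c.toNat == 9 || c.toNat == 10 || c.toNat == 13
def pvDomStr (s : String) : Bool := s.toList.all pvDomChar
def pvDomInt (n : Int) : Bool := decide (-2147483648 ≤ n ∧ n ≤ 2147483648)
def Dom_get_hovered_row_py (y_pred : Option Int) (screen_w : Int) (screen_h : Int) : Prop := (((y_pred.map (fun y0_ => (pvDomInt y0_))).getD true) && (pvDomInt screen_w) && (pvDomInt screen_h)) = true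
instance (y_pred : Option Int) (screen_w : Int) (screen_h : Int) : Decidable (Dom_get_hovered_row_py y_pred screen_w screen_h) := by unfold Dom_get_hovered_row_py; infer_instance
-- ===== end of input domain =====

-- B replaces A's scan over the 6 rows with a closed-form row index computation (objective: simpler).

-- ===== PORT A =====
-- port of _key_bounds (row, screen_w, screen_h) -> (x1, y1, x2, y2)
def key_bounds_py (row : Int) (screen_w : Int) (screen_h : Int) : Int × Int × Int × Int :=
  let n : Int := 6
  let avail_h := screen_h - (n - 1) * 10
  let key_h := PySem.Int.floordiv avail_h n
  let y1 := row * (key_h + 10)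
  let y2 := y1 + key_h
  let x1 := PySem.Int.floordiv (screen_w - 300) 2
  let x2 := x1 + 300
  (x1, y1, x2, y2)

-- the 'for ki in range(...)' loop with early return
def ghrLoop (y : Int) (screen_w : Int) (screen_h : Int) : List Int → Option Int
  | [] => none
  | ki :: rest =>
    let b := key_bounds_py ki screen_w screen_h
    if b.2.1 ≤ y ∧ y ≤ b.2.2.2 then some ki
    else ghrLoop y screen_w screen_h rest

def get_hovered_row_py (y_pred : Option Int) (screen_w : Int) (screen_h : Int) : Option Int :=
  match y_pred with
  | none => none
  | some y => ghrLoop y screen_w screen_h (PySem.List.pyRange 0 6 1)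

-- ===== PORT B =====
def get_hovered_row_py_alt (y_pred : Option Int) (screen_w : Int) (screen_h : Int) : Option Int :=
  match y_pred with
  | none => none
  | some y =>
    let key_h := PySem.Int.floordiv (screen_h - 5 * 10) 6
    if key_h < 0 then none
    else
      let period := key_h + 10
      let row := PySem.Int.floordiv y period
      if 0 ≤ row ∧ row < 6 ∧ y - row * period ≤ key_h then some row else none

-- ===== PRECONDITION & SPEC =====
def Spec_get_hovered_row_py (y_pred : Option Int) (screen_w : Int) (screen_h : Int) (out : Option Int) : Prop := out = get_hovered_row_py_alt y_pred screen_w screen_h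
instance (y_pred : Option Int) (screen_w : Int) (screen_h : Int) (out : Option Int) : Decidable (Spec_get_hovered_row_py y_pred screen_w screen_h out) := by unfold Spec_get_hovered_row_py; infer_instance

-- ===== CLAIM (what is proved, stated in full; the proofs are below) =====
def Claim_equal_get_hovered_row_py : Prop := ∀ (y_pred : Option Int) (screen_w : Int) (screen_h : Int), Dom_get_hovered_row_py y_pred screen_w screen_h → Spec_get_hovered_row_py y_pred screen_w screen_h (get_hovered_row_py y_pred screen_w screen_h)

-- ===== LEMMAS AND PROOFS =====

-- A's loop over the concrete list [0,1,2,3,4,5], with key_h abstracted as h and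
-- q = y // (h + 10) characterised by its bracketing inequalities
theorem ghr_core (y h q : Int) (hq1 : ¬ h < 0 → q * (h + 10) ≤ y)
    (hq2 : ¬ h < 0 → y < (q + 1) * (h + 10)) (w sh : Int)
    (hh : PySem.Int.floordiv (sh - (6 - 1) * 10) 6 = h) :
    ghrLoop y w sh [0, 1, 2, 3, 4, 5] =
      (if h < 0 then none
       else if 0 ≤ q ∧ q < 6 ∧ y - q * (h + 10) ≤ h then some q else none) := by
  simp only [ghrLoop, key_bounds_py, hh]
  by_cases hneg : h < 0
  · split_ifs <;> first | rfl | (exfalso; omega)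
  · have h1 := hq1 hneg
    have h2 := hq2 hneg
    rcases lt_or_ge q 0 with hq | hq
    · have hy : y < 0 := by
        have : (q + 1) * (h + 10) ≤ 0 :=
          mul_nonpos_iff.mpr (Or.inr ⟨by omega, by omega⟩)
        omega
      split_ifs <;> first | rfl | (exfalso; omega)
    · rcases lt_or_ge q 6 with hq6 | hq6
      · interval_cases q <;>
          split_ifs <;> first | rfl | (exfalso; omega)
      · have hy : 6 * (h + 10) ≤ y := by
          have : 6 * (h + 10) ≤ q * (h + 10) :=
            mul_le_mul_of_nonneg_right (by omega) (by omega)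
          omega
        split_ifs <;> first | rfl | (exfalso; omega)

-- ===== VERDICT (by name: the statement is the Claim_ definition above) =====
theorem get_hovered_row_py_spec : Claim_equal_get_hovered_row_py := by
  unfold Claim_equal_get_hovered_row_py
  intro y_pred w sh _
  unfold Spec_get_hovered_row_py
  cases y_pred with
  | none => rfl
  | some y =>
    show ghrLoop y w sh (PySem.List.pyRange 0 6 1) = _
    have hr : PySem.List.pyRange (0:Int) 6 1 = [0, 1, 2, 3, 4, 5] := by decide
    have hh : PySem.Int.floordiv (sh - (6 - 1) * 10) 6
        = PySem.Int.floordiv (sh - 5 * 10) 6 := by norm_num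
    set h := PySem.Int.floordiv (sh - 5 * 10) 6 with hhdef
    set q := PySem.Int.floordiv y (h + 10) with hqdef
    have hbr : ¬ h < 0 → q * (h + 10) ≤ y ∧ y < (q + 1) * (h + 10) := by
      intro hnn
      exact (PySem.Int.floordiv_eq_iff_of_pos (by omega)).mp hqdef.symm
    rw [hr, ghr_core y h q (fun hn => (hbr hn).1) (fun hn => (hbr hn).2) w sh hh]
    simp only [get_hovered_row_py_alt, ← hhdef, ← hqdef]
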